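-- pv_equiv track=rewrite | github.com/jbabcanec/MuseGen | data/validation/plot_intensity.py | calculate_tension
-- ===== SOURCE A (Python) =====
-- def interval_tension(interval):
--     # Define intervals that typically create tension
--     tension_intervals = [1, 6, 10, 11]  # Minor second, tritone, major seventh
--     return interval in tension_intervals
--
-- def calculate_tension(active_notes):
--     tension_score = 0
--     for note1 in active_notes:
--         for note2 in active_notes:
--             if note1 != note2:
--                 interval = abs(note1 - note2) % 12  # Calculate the interval in semitones, considering octave equivalence
--                 if interval_tension(interval):
--                     tension_score += 1
--     return tension_score
-- ===== SOURCE B (Python) =====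
-- def calculate_tension(active_notes):
--     # Sort once, sweep with a pitch-class histogram of already-seen (smaller-or-equal)
--     # notes; each unordered tension pair is found once and counted twice.
--     tension_offsets = (1, 6, 10, 11)
--     hist = {}
--     total = 0
--     for note in sorted(active_notes):
--         r = note % 12
--         for t in tension_offsets:
--             total += hist.get((r - t) % 12, 0)
--         hist[r] = hist.get(r, 0) + 1
--     return 2 * total
-- ===== Notes on version B (the rewrite author's own statement) =====
-- stated objective: faster
-- what changed: Replaced the all-pairs double loop with sort + single sweep that keeps a pitch-class histogram of already-seen notes and adds the counts of the four tension residues per note, doubling at the end.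
import Mathlib
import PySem

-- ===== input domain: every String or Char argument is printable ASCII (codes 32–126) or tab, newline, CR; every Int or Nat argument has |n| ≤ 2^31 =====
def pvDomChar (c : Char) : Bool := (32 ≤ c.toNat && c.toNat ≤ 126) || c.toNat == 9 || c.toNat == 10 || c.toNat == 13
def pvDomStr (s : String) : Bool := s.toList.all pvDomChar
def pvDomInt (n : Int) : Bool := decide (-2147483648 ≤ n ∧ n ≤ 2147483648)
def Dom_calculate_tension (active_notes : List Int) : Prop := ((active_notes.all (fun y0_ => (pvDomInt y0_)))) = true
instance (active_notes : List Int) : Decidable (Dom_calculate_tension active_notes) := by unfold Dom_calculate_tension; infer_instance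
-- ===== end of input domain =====

-- B replaces A's O(n^2) all-pairs scan by sort + one sweep with a pitch-class histogram (measured faster on large inputs).

-- ===== PORT A =====
def interval_tension (interval : Int) : Bool := decide (interval ∈ ([1, 6, 10, 11] : List Int))

def calculate_tension (active_notes : List Int) : Int :=
  active_notes.foldl (fun s note1 =>
    active_notes.foldl (fun s note2 =>
      if note1 ≠ note2 then
        let interval := PySem.Int.mod (|note1 - note2|) 12
        if interval_tension interval then s + 1 else s
      else s) s) 0

-- ===== PORT B =====
def calculate_tension_alt (active_notes : List Int) : Int :=
  let res := (PySem.List.sorted active_notes (fun x => x) false).foldl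
    (fun (st : PySem.Dict Int Int × Int) note =>
      let r := PySem.Int.mod note 12
      let total := ([1, 6, 10, 11] : List Int).foldl
        (fun tot t => tot + st.1.getD (PySem.Int.mod (r - t) 12) 0) st.2
      (st.1.insert r (st.1.getD r 0 + 1), total))
    (PySem.Dict.empty, 0)
  2 * res.2

-- ===== PRECONDITION & SPEC =====
def Spec_calculate_tension (active_notes : List Int) (out : Int) : Prop := out = calculate_tension_alt active_notes
instance (active_notes : List Int) (out : Int) : Decidable (Spec_calculate_tension active_notes out) := by unfold Spec_calculate_tension; infer_instance

-- ===== CLAIM (what is proved, stated in full; the proofs are below) =====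
def Claim_equal_calculate_tension : Prop := ∀ (active_notes : List Int), Dom_calculate_tension active_notes → Spec_calculate_tension active_notes (calculate_tension active_notes)

-- ===== LEMMAS AND PROOFS =====

-- weight of an ordered pair: 1 iff it is a tension pair as A counts it
def pvW (u v : Int) : Int :=
  if PySem.Int.mod (|u - v|) 12 ∈ ([1, 6, 10, 11] : List Int) then 1 else 0

-- A's double sum
def pvDsum (M : List Int) : Int :=
  (M.map (fun u => (M.map (fun v => pvW u v)).sum)).sum

-- sum of pvW over index pairs i < j
def pvPairs2 : List Int → Int
  | [] => 0
  | x :: xs => (xs.map (fun y => pvW x y)).sum + pvPairs2 xs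

-- B's accumulation: cross pairs against a processed prefix P
def pvCp (P : List Int) : List Int → Int
  | [] => 0
  | x :: xs => (P.map (fun v => pvW x v)).sum + pvCp (P ++ [x]) xs

-- B's loop body, named so the sweep invariant can be stated about it
def pvStep (st : PySem.Dict Int Int × Int) (note : Int) : PySem.Dict Int Int × Int :=
  let r := PySem.Int.mod note 12
  let total := ([1, 6, 10, 11] : List Int).foldl
    (fun tot t => tot + st.1.getD (PySem.Int.mod (r - t) 12) 0) st.2
  (st.1.insert r (st.1.getD r 0 + 1), total)

lemma pvW_symm (u v : Int) : pvW u v = pvW v u := by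
  unfold pvW; rw [abs_sub_comm]

lemma pvW_diag (u : Int) : pvW u u = 0 := by
  unfold pvW
  simp [PySem.Int.mod]

lemma calculate_tension_eq_dsum (L : List Int) : calculate_tension L = pvDsum L := by
  unfold calculate_tension pvDsum
  have hinner : ∀ (s n1 : Int),
      L.foldl (fun s note2 =>
        if n1 ≠ note2 then
          let interval := PySem.Int.mod (|n1 - note2|) 12
          if interval_tension interval then s + 1 else s
        else s) s = s + (L.map (fun v => pvW n1 v)).sum := by
    intro s n1
    have hfun : (fun (s note2 : Int) =>
        if n1 ≠ note2 then
          let interval := PySem.Int.mod (|n1 - note2|) 12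
          if interval_tension interval then s + 1 else s
        else s) = (fun (s note2 : Int) => s + pvW n1 note2) := by
      funext s v
      by_cases h : n1 = v
      · subst h; simp [pvW_diag]
      · simp only [h, ne_eq, not_false_eq_true, if_true, interval_tension, pvW]
        split_ifs with h1 h2 h2 <;> simp_all
    rw [hfun, PySem.List.foldl_add]
  calc L.foldl (fun s note1 =>
        L.foldl (fun s note2 =>
          if note1 ≠ note2 then
            let interval := PySem.Int.mod (|note1 - note2|) 12
            if interval_tension interval then s + 1 else s
          else s) s) 0
      = L.foldl (fun s note1 => s + (L.map (fun v => pvW note1 v)).sum) 0 := by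
        apply PySem.List.foldl_congr_mem
        intro acc x _
        exact hinner acc x
    _ = 0 + (L.map (fun u => (L.map (fun v => pvW u v)).sum)).sum := by
        rw [PySem.List.foldl_add]
    _ = _ := by rw [zero_add]

lemma pvDsum_perm {M M' : List Int} (h : M.Perm M') : pvDsum M = pvDsum M' := by
  unfold pvDsum
  have hinner : ∀ u, (M.map (fun v => pvW u v)).sum = (M'.map (fun v => pvW u v)).sum :=
    fun u => (h.map _).sum_eq
  calc (M.map (fun u => (M.map (fun v => pvW u v)).sum)).sum
      = (M.map (fun u => (M'.map (fun v => pvW u v)).sum)).sum := by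
        exact congrArg List.sum (List.map_congr_left (fun u _ => hinner u))
    _ = (M'.map (fun u => (M'.map (fun v => pvW u v)).sum)).sum :=
        (h.map _).sum_eq

lemma pvDsum_eq_two_pairs2 (M : List Int) : pvDsum M = 2 * pvPairs2 M := by
  induction M with
  | nil => simp [pvDsum, pvPairs2]
  | cons x xs ih =>
    unfold pvDsum pvPairs2
    simp only [List.map_cons, List.sum_cons]
    have hswap : (xs.map (fun u => pvW u x)).sum = (xs.map (fun y => pvW x y)).sum :=
      congrArg List.sum (List.map_congr_left (fun u _ => pvW_symm u x))
    have hsplit : (xs.map (fun u => pvW u x + (xs.map (fun v => pvW u v)).sum)).sum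
        = (xs.map (fun u => pvW u x)).sum + (xs.map (fun u => (xs.map (fun v => pvW u v)).sum)).sum := by
      simpa using PySem.List.sum_map_add_int (fun u => pvW u x)
        (fun u => (xs.map (fun v => pvW u v)).sum) xs
    rw [pvW_diag, hsplit, hswap]
    unfold pvDsum at ih
    linarith

-- count of notes in P whose pitch class is r
def pvPhi (P : List Int) (r : Int) : Int :=
  ((P.map (fun v => PySem.Int.mod v 12)).count r : Int)

lemma pvW_indicator (x v : Int) (hvx : v ≤ x) :
    (if PySem.Int.mod v 12 = PySem.Int.mod (PySem.Int.mod x 12 - 1) 12 then (1:Int) else 0)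
    + (if PySem.Int.mod v 12 = PySem.Int.mod (PySem.Int.mod x 12 - 6) 12 then (1:Int) else 0)
    + (if PySem.Int.mod v 12 = PySem.Int.mod (PySem.Int.mod x 12 - 10) 12 then (1:Int) else 0)
    + (if PySem.Int.mod v 12 = PySem.Int.mod (PySem.Int.mod x 12 - 11) 12 then (1:Int) else 0)
    = pvW x v := by
  have habs : |x - v| = x - v := abs_of_nonneg (by omega)
  unfold pvW
  rw [habs]
  simp only [PySem.Int.mod_eq_emod_of_pos (show (0:Int) < 12 by norm_num),
    List.mem_cons, List.not_mem_nil, or_false]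
  split_ifs <;> omega

lemma pvPhi_cross (x : Int) (P : List Int) (hP : ∀ v ∈ P, v ≤ x) :
    pvPhi P (PySem.Int.mod (PySem.Int.mod x 12 - 1) 12)
    + pvPhi P (PySem.Int.mod (PySem.Int.mod x 12 - 6) 12)
    + pvPhi P (PySem.Int.mod (PySem.Int.mod x 12 - 10) 12)
    + pvPhi P (PySem.Int.mod (PySem.Int.mod x 12 - 11) 12)
    = (P.map (fun v => pvW x v)).sum := by
  induction P with
  | nil => simp [pvPhi]
  | cons v P' ih =>
    have hv : v ≤ x := hP v (List.mem_cons_self ..)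
    have hP' : ∀ u ∈ P', u ≤ x := fun u hu => hP u (List.mem_cons_of_mem _ hu)
    have hcnt : ∀ r, pvPhi (v :: P') r
        = (if PySem.Int.mod v 12 = r then (1:Int) else 0) + pvPhi P' r := by
      intro r
      unfold pvPhi
      simp only [List.map_cons, List.count_cons]
      push_cast
      by_cases h : PySem.Int.mod v 12 = r <;> simp [h] <;> omega
    rw [hcnt, hcnt, hcnt, hcnt]
    simp only [List.map_cons, List.sum_cons]
    rw [← ih hP', ← pvW_indicator x v hv]
    ring

lemma pvPhi_append (P : List Int) (x r : Int) :
    pvPhi (P ++ [x]) r = pvPhi P r + (if PySem.Int.mod x 12 = r then 1 else 0) := by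
  unfold pvPhi
  simp only [List.map_append, List.map_cons, List.map_nil, List.count_append]
  by_cases h : PySem.Int.mod x 12 = r <;> simp [h, List.count_cons]

-- the sweep invariant: hist represents the pitch classes of P, everything in P is ≤ everything ahead
lemma pvGo_snd (M : List Int) : ∀ (h : PySem.Dict Int Int) (tot : Int) (P : List Int),
    (∀ r, h.getD r 0 = pvPhi P r) →
    (∀ v ∈ P, ∀ m ∈ M, v ≤ m) → M.Pairwise (· ≤ ·) →
    (M.foldl pvStep (h, tot)).2 = tot + pvCp P M := by
  induction M with
  | nil => intro h tot P _ _ _; simp [pvCp]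
  | cons x xs ih =>
    intro h tot P hh hle hpw
    have hPx : ∀ v ∈ P, v ≤ x := fun v hv => hle v hv x (List.mem_cons_self ..)
    have hxxs : ∀ m ∈ xs, x ≤ m := (List.pairwise_cons.mp hpw).1
    have hle' : ∀ v ∈ P ++ [x], ∀ m ∈ xs, v ≤ m := by
      intro v hv m hm
      rcases List.mem_append.mp hv with hv | hv
      · exact hle v hv m (List.mem_cons_of_mem _ hm)
      · simp only [List.mem_singleton] at hv; subst hv; exact hxxs m hm
    have hpw' : xs.Pairwise (· ≤ ·) := (List.pairwise_cons.mp hpw).2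
    have hh' : ∀ r, ((h.insert (PySem.Int.mod x 12) (h.getD (PySem.Int.mod x 12) 0 + 1)).getD r 0)
        = pvPhi (P ++ [x]) r := by
      intro r
      rw [PySem.Dict.getD_insert, pvPhi_append]
      rcases eq_or_ne r (PySem.Int.mod x 12) with hr | hr
      · rw [if_pos hr, if_pos hr.symm, hh, hr]
      · rw [if_neg hr, if_neg (Ne.symm hr), hh]; ring
    have hstep : pvStep (h, tot) x
        = (h.insert (PySem.Int.mod x 12) (h.getD (PySem.Int.mod x 12) 0 + 1),
           tot + h.getD (PySem.Int.mod (PySem.Int.mod x 12 - 1) 12) 0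
               + h.getD (PySem.Int.mod (PySem.Int.mod x 12 - 6) 12) 0
               + h.getD (PySem.Int.mod (PySem.Int.mod x 12 - 10) 12) 0
               + h.getD (PySem.Int.mod (PySem.Int.mod x 12 - 11) 12) 0) := rfl
    rw [List.foldl_cons, hstep, ih _ _ (P ++ [x]) hh' hle' hpw']
    show _ = tot + ((P.map (fun v => pvW x v)).sum + pvCp (P ++ [x]) xs)
    rw [hh, hh, hh, hh, ← pvPhi_cross x P hPx]
    ring

lemma calculate_tension_alt_eq (L : List Int) :
    calculate_tension_alt L = 2 * pvCp [] (PySem.List.sorted L (fun x => x) false) := by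
  have h0 : ∀ r : Int, (PySem.Dict.empty : PySem.Dict Int Int).getD r 0 = pvPhi [] r := by
    intro r; simp [pvPhi, PySem.Dict.getD_empty]
  have hfold : ((PySem.List.sorted L (fun x => x) false).foldl pvStep
      ((PySem.Dict.empty : PySem.Dict Int Int), (0 : Int))).2
      = 0 + pvCp [] (PySem.List.sorted L (fun x => x) false) :=
    pvGo_snd _ PySem.Dict.empty 0 [] h0 (by simp)
      (by simpa using PySem.List.sorted_pairwise L (fun x => x))
  show 2 * ((PySem.List.sorted L (fun x => x) false).foldl pvStep
      ((PySem.Dict.empty : PySem.Dict Int Int), (0 : Int))).2 = _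
  rw [hfold, zero_add]

lemma pvCp_eq (M : List Int) : ∀ P : List Int,
    pvCp P M = (M.map (fun u => (P.map (fun v => pvW u v)).sum)).sum + pvPairs2 M := by
  induction M with
  | nil => intro P; simp [pvCp, pvPairs2]
  | cons x xs ih =>
    intro P
    unfold pvCp pvPairs2
    rw [ih (P ++ [x])]
    have hsplit : (xs.map (fun u => ((P ++ [x]).map (fun v => pvW u v)).sum)).sum
        = (xs.map (fun u => (P.map (fun v => pvW u v)).sum)).sum + (xs.map (fun u => pvW u x)).sum := by
      have hone : ∀ u, ((P ++ [x]).map (fun v => pvW u v)).sum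
          = (P.map (fun v => pvW u v)).sum + pvW u x := by intro u; simp
      rw [List.map_congr_left (fun u _ => hone u)]
      simpa using PySem.List.sum_map_add_int
        (fun u => (P.map (fun v => pvW u v)).sum) (fun u => pvW u x) xs
    have hswap : (xs.map (fun u => pvW u x)).sum = (xs.map (fun y => pvW x y)).sum :=
      congrArg List.sum (List.map_congr_left (fun u _ => pvW_symm u x))
    simp only [List.map_cons, List.sum_cons]
    rw [hsplit, hswap]
    ring

-- ===== VERDICT (by name: the statement is the Claim_ definition above) =====
theorem calculate_tension_spec : Claim_equal_calculate_tension := by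
  intro L _
  unfold Spec_calculate_tension
  have hperm : (PySem.List.sorted L (fun x => x) false).Perm L := PySem.List.sorted_perm L _ _
  rw [calculate_tension_eq_dsum, calculate_tension_alt_eq, pvCp_eq]
  rw [pvDsum_perm hperm.symm, pvDsum_eq_two_pairs2]
  simp
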